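-- pv_equiv track=rewrite | github.com/adamws/kicad-kbplacer | kbplacer/kle_serial.py | find_best_label_alignment
-- ===== SOURCE A (Python) =====
-- from typing import Any, Dict, Iterator, List, Optional, Tuple, Type, Union
--
-- KEY_MAX_LABELS = 12
--
-- REVERSE_LABEL_MAP: List[List[int]] = [
--     # 0  1  2  3  4  5  6  7  8  9 10 11   # align flags
--     [ 0, 8, 2, 6, 9, 7, 1,10, 3, 4,11, 5], # 0 = no centering
--     [-1, 0,-1,-1, 6,-1,-1, 1,-1, 4,11, 5], # 1 = center x
--     [-1,-1,-1, 0, 8, 2,-1,-1,-1, 4,11, 5], # 2 = center y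
--     [-1,-1,-1,-1, 0,-1,-1,-1,-1, 4,11, 5], # 3 = center x & y
--     [ 0, 8, 2, 6, 9, 7, 1,10, 3,-1, 4,-1], # 4 = center front (default)
--     [-1, 0,-1,-1, 6,-1,-1, 1,-1,-1, 4,-1], # 5 = center front & x
--     [-1,-1,-1, 0, 8, 2,-1,-1,-1,-1, 4,-1], # 6 = center front & y
--     [-1,-1,-1,-1, 0,-1,-1,-1,-1,-1, 4,-1], # 7 = center front & x & y
-- ]
--
-- def reorder_items_kle(items, align) -> List[Any]:
--     ret: List[Any] = KEY_MAX_LABELS * [None]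
--     for i, label in enumerate(items):
--         if label:
--             index = REVERSE_LABEL_MAP[align][i]
--             if index == -1:
--                 ret = []
--                 break
--             ret[index] = label
--     while ret and ret[-1] is None:
--         ret.pop()
--     return ret
--
-- def find_best_label_alignment(labels) -> Tuple[int, List[Any]]:
--     results = {}
--     for align in reversed(range(0, 8)):
--         if ret := reorder_items_kle(labels, align):
--             results[align] = ret
--
--     if results.items():
--         best = min(results.items(), key=lambda x: len(x[1]))
--         return best[0], best[1]
--     else:
--         return 0, []
-- ===== SOURCE B (Python) =====
-- KEY_MAX_LABELS = 12
--
-- # FORWARD_LABEL_MAP[align][j] = index in the raw KLE label list whose label lands at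
-- # ordered position j for this alignment, or -1 if no raw index maps there
-- # (the row-wise inverse of REVERSE_LABEL_MAP).
-- FORWARD_LABEL_MAP = [
--     [0, 6, 2, 8, 9, 11, 3, 5, 1, 4, 7, 10],
--     [1, 7, -1, -1, 9, 11, 4, -1, -1, -1, -1, 10],
--     [3, -1, 5, -1, 9, 11, -1, -1, 4, -1, -1, 10],
--     [4, -1, -1, -1, 9, 11, -1, -1, -1, -1, -1, 10],
--     [0, 6, 2, 8, 10, -1, 3, 5, 1, 4, 7, -1],
--     [1, 7, -1, -1, 10, -1, 4, -1, -1, -1, -1, -1],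
--     [3, -1, 5, -1, 10, -1, -1, -1, 4, -1, -1, -1],
--     [4, -1, -1, -1, 10, -1, -1, -1, -1, -1, -1, -1],
-- ]
--
-- def _gather(labels, fwd, j):
--     # label landing at ordered position j, if any
--     src = fwd[j]
--     if src != -1 and src < len(labels) and labels[src]:
--         return labels[src]
--     return None
--
-- def find_best_label_alignment(labels):
--     best_align = None
--     best_len = None
--     for align in range(7, -1, -1):
--         fwd = FORWARD_LABEL_MAP[align]
--         ok = True
--         for i, label in enumerate(labels):
--             if label and i not in fwd:
--                 ok = False
--         length = 0
--         for j in range(KEY_MAX_LABELS):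
--             if _gather(labels, fwd, j) is not None:
--                 length = j + 1
--         if ok and length and (best_len is None or length < best_len):
--             best_align = align
--             best_len = length
--     if best_align is None:
--         return 0, []
--     fwd = FORWARD_LABEL_MAP[best_align]
--     return best_align, [_gather(labels, fwd, j) for j in range(best_len)]
-- ===== Notes on version B (the rewrite author's own statement) =====
-- stated objective: alternative
-- what changed: B inverts REVERSE_LABEL_MAP into a FORWARD_LABEL_MAP and gathers per output position instead of scattering into a 12-slot buffer and trimming: per alignment it computes only a validity flag and the result length, keeps the running best, and materializes the label list once for the winning alignment (A builds every candidate list, collects them in a dict and takes min by length).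
import Mathlib
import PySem

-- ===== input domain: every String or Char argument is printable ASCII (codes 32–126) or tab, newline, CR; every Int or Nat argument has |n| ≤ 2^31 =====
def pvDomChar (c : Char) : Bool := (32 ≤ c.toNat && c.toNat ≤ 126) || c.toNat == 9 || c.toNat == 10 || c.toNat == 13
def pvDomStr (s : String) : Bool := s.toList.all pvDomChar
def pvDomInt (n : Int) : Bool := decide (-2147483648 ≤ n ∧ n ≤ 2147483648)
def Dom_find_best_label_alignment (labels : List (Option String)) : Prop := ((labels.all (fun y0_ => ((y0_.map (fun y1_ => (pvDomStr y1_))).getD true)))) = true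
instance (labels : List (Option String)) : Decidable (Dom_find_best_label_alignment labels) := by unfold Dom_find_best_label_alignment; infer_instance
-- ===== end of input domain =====

-- B replaces A's scatter through REVERSE_LABEL_MAP (fill a 12-slot buffer per alignment,
-- trim, collect into a dict, take min) by a gather through the inverse FORWARD_LABEL_MAP:
-- per alignment it only computes a validity flag and the result length, and materializes
-- the label list once, for the winning alignment (objective: alternative).

-- ===== PORT A =====
-- REVERSE_LABEL_MAP
def pvRevMap : List (List Int) :=
  [[ 0, 8, 2, 6, 9, 7, 1,10, 3, 4,11, 5],
   [-1, 0,-1,-1, 6,-1,-1, 1,-1, 4,11, 5],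
   [-1,-1,-1, 0, 8, 2,-1,-1,-1, 4,11, 5],
   [-1,-1,-1,-1, 0,-1,-1,-1,-1, 4,11, 5],
   [ 0, 8, 2, 6, 9, 7, 1,10, 3,-1, 4,-1],
   [-1, 0,-1,-1, 6,-1,-1, 1,-1,-1, 4,-1],
   [-1,-1,-1, 0, 8, 2,-1,-1,-1,-1, 4,-1],
   [-1,-1,-1,-1, 0,-1,-1,-1,-1,-1, 4,-1]]

-- Python truthiness of a label (None and "" are falsy)
def pvTruthy (o : Option String) : Bool :=
  match o with
  | none => false
  | some s => s ≠ ""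

-- the `for i, label in enumerate(items)` loop with its `break`
-- (REVERSE_LABEL_MAP[align][i] raises IndexError in Python for a truthy label at i ≥ 12;
--  such inputs are outside Pre_, so the port's getD default is never reached inside Pre_)
def pvReorderLoop (align : Int) : List (Option String) → Nat → List (Option String) → List (Option String)
  | [], _, ret => ret
  | lab :: rest, i, ret =>
    if pvTruthy lab then
      let index := (pvRevMap.getD align.toNat []).getD i (-1)
      if index = -1 then []
      else pvReorderLoop align rest (i + 1) (ret.set index.toNat lab)
    else pvReorderLoop align rest (i + 1) ret

-- `while ret and ret[-1] is None: ret.pop()`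
def pvPopTrailing : List (Option String) → List (Option String)
  | [] => []
  | x :: xs =>
    match pvPopTrailing xs with
    | [] => if x = none then [] else [x]
    | ys => x :: ys

def reorder_items_kle (items : List (Option String)) (align : Int) : List (Option String) :=
  pvPopTrailing (pvReorderLoop align items 0 (List.replicate 12 none))

-- body of A's `for align in reversed(range(0, 8))` loop: `if ret := …: results[align] = ret`
def pvCollectStep (labels : List (Option String)) (d : PySem.Dict Int (List (Option String)))
    (align : Int) : PySem.Dict Int (List (Option String)) :=
  let ret := reorder_items_kle labels align
  if ret = [] then d else d.insert align ret

def find_best_label_alignment (labels : List (Option String)) : Int × List (Option String) :=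
  let results : PySem.Dict Int (List (Option String)) :=
    ((PySem.List.pyRange 0 8 1).reverse).foldl (pvCollectStep labels) PySem.Dict.empty
  match PySem.List.min? results.items (fun x => x.2.length) with
  | some best => (best.1, best.2)
  | none => (0, [])

-- ===== PORT B =====
-- FORWARD_LABEL_MAP (row-wise inverse of REVERSE_LABEL_MAP)
def pvFwdMap : List (List Int) :=
  [[0, 6, 2, 8, 9, 11, 3, 5, 1, 4, 7, 10],
   [1, 7, -1, -1, 9, 11, 4, -1, -1, -1, -1, 10],
   [3, -1, 5, -1, 9, 11, -1, -1, 4, -1, -1, 10],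
   [4, -1, -1, -1, 9, 11, -1, -1, -1, -1, -1, 10],
   [0, 6, 2, 8, 10, -1, 3, 5, 1, 4, 7, -1],
   [1, 7, -1, -1, 10, -1, 4, -1, -1, -1, -1, -1],
   [3, -1, 5, -1, 10, -1, -1, -1, 4, -1, -1, -1],
   [4, -1, -1, -1, 10, -1, -1, -1, -1, -1, -1, -1]]

-- `_gather(labels, fwd, j)`; `labels[src]` is exact as getD since the table's entries are
-- ≥ -1, so under the guard src is a genuine in-range non-negative index
def pvGather (labels : List (Option String)) (fwd : List Int) (j : Nat) : Option String :=
  let src := fwd.getD j (-1)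
  if src ≠ -1 ∧ src < (labels.length : Int) ∧ pvTruthy (labels.getD src.toNat none) then
    labels.getD src.toNat none
  else none

-- `for i, label in enumerate(labels): if label and i not in fwd: ok = False`
def pvOkLoop (labels : List (Option String)) (fwd : List Int) : Bool :=
  (PySem.List.enumerate labels).foldl
    (fun ok p => if pvTruthy p.2 ∧ ¬(p.1 ∈ fwd) then false else ok) true

-- `for j in range(KEY_MAX_LABELS): if _gather(...) is not None: length = j + 1`
-- (range(12) has only non-negative indices, ported as List.range 12)
def pvLenLoop (labels : List (Option String)) (fwd : List Int) : Nat :=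
  (List.range 12).foldl
    (fun length j => if pvGather labels fwd j ≠ none then j + 1 else length) 0

-- body of B's `for align in range(7, -1, -1)` loop over (best_align, best_len)
def pvAlignStep (labels : List (Option String)) (best : Option (Int × Nat))
    (align : Int) : Option (Int × Nat) :=
  let fwd := pvFwdMap.getD align.toNat []
  let ok := pvOkLoop labels fwd
  let length := pvLenLoop labels fwd
  let better : Bool := match best with | none => true | some b => decide (length < b.2)
  if ok && (length != 0) && better then some (align, length) else best

def find_best_label_alignment_alt (labels : List (Option String)) : Int × List (Option String) :=
  match (PySem.List.pyRange 7 (-1) (-1)).foldl (pvAlignStep labels) none with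
  | none => (0, [])
  | some (a, L) => (a, (List.range L).map (fun j => pvGather labels (pvFwdMap.getD a.toNat []) j))

-- ===== PRECONDITION & SPEC =====
-- Pre_ excludes exactly the inputs where Python A raises IndexError: a truthy label
-- (non-None, non-empty) at an index ≥ 12 makes REVERSE_LABEL_MAP[align][12+] fail.
def Pre_find_best_label_alignment (labels : List (Option String)) : Prop :=
  ((labels.drop 12).all (fun o => o.getD "" = "")) = true
instance (labels : List (Option String)) : Decidable (Pre_find_best_label_alignment labels) := by unfold Pre_find_best_label_alignment; infer_instance

def pvWitness_find_best_label_alignment : List (Option String) :=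
  [some "a", none, some "b", some "", some "c"]

def Spec_find_best_label_alignment (labels : List (Option String)) (out : Int × List (Option String)) : Prop := out = find_best_label_alignment_alt labels
instance (labels : List (Option String)) (out : Int × List (Option String)) : Decidable (Spec_find_best_label_alignment labels out) := by unfold Spec_find_best_label_alignment; infer_instance

-- ===== CLAIM (what is proved, stated in full; the proofs are below) =====
def Claim_equal_find_best_label_alignment : Prop := ∀ (labels : List (Option String)), Dom_find_best_label_alignment labels → Pre_find_best_label_alignment labels → Spec_find_best_label_alignment labels (find_best_label_alignment labels)

-- ===== LEMMAS AND PROOFS =====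

-- the label list B would materialize for alignment a at length L
def pvMat (labels : List (Option String)) (a : Int) (L : Nat) : List (Option String) :=
  (List.range L).map (fun j => pvGather labels (pvFwdMap.getD a.toNat []) j)

-- A's collect + min, fused into a running first-strict-minimum best (proof-side only)
def pvBestStep (labels : List (Option String)) (best : Option (Int × List (Option String)))
    (align : Int) : Option (Int × List (Option String)) :=
  let ret := reorder_items_kle labels align
  if ret = [] then best
  else
    match best with
    | none => some (align, ret)
    | some b => if ret.length < b.2.length then some (align, ret) else best

-- decidable table facts relating a REVERSE row to its FORWARD row
def pvRowOk (row frow : List Int) : Prop :=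
  row.length = 12 ∧ frow.length = 12 ∧
  (∀ i : Nat, i < 12 → ∀ j : Nat, j < 12 → (row.getD i (-1) = (j : Int) ↔ frow.getD j (-1) = (i : Int))) ∧
  (∀ i : Nat, i < 12 → ((i : Int) ∈ frow ↔ row.getD i (-1) ≠ -1)) ∧
  (∀ n : Int, n ∈ frow → n = -1 ∨ ∃ i : Nat, i < 12 ∧ n = (i : Int)) ∧
  (∀ i : Nat, i < 12 → row.getD i (-1) = -1 ∨ ∃ j : Nat, j < 12 ∧ row.getD i (-1) = (j : Int))

theorem pvRowOk_all : ∀ a : Nat, a < 8 → pvRowOk (pvRevMap.getD a []) (pvFwdMap.getD a []) := by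
  intro a ha
  interval_cases a <;> (unfold pvRowOk; decide)

theorem pyRange_0_8_rev : (PySem.List.pyRange 0 8 1).reverse = [7, 6, 5, 4, 3, 2, 1, 0] := by decide
theorem pyRange_7_down : PySem.List.pyRange 7 (-1) (-1) = [7, 6, 5, 4, 3, 2, 1, 0] := by decide

theorem collectStep_nil {labels : List (Option String)} {d : PySem.Dict Int (List (Option String))}
    {a : Int} (h : reorder_items_kle labels a = []) : pvCollectStep labels d a = d := by
  simp [pvCollectStep, h]

theorem collectStep_cons {labels : List (Option String)} {d : PySem.Dict Int (List (Option String))}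
    {a : Int} (h : ¬ reorder_items_kle labels a = []) :
    pvCollectStep labels d a = d.insert a (reorder_items_kle labels a) := by
  simp [pvCollectStep, h]

theorem bestStep_nil {labels : List (Option String)} {b : Option (Int × List (Option String))}
    {a : Int} (h : reorder_items_kle labels a = []) : pvBestStep labels b a = b := by
  simp [pvBestStep, h]

theorem bestStep_cons {labels : List (Option String)} {b : Option (Int × List (Option String))}
    {a : Int} (h : ¬ reorder_items_kle labels a = []) :
    pvBestStep labels b a =
      (match b with
       | none => some (a, reorder_items_kle labels a)
       | some p => if (reorder_items_kle labels a).length < p.2.length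
                   then some (a, reorder_items_kle labels a) else b) := by
  simp [pvBestStep, h]

-- A collects the non-empty reorder results into a dict (fresh keys append in iteration
-- order) and takes the first length-minimum of its items; PySem.List.min? is itself a
-- first-strict-minimum foldl, so it fuses with the appends into a running best.
theorem pv_fuse (labels : List (Option String)) :
    ∀ (as : List Int), as.Nodup →
    ∀ (d : PySem.Dict Int (List (Option String))),
      (∀ a ∈ as, d.contains a = false) →
      PySem.List.min? ((as.foldl (pvCollectStep labels) d).items) (fun x => x.2.length)
        = as.foldl (pvBestStep labels)
            (PySem.List.min? d.items (fun x => x.2.length)) := by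
  intro as
  induction as with
  | nil => intro _ d _; rfl
  | cons a rest ih =>
    intro hnd d hc
    have hca : d.contains a = false := hc a (List.mem_cons_self ..)
    have hnd' : rest.Nodup := (List.nodup_cons.mp hnd).2
    have hna : a ∉ rest := (List.nodup_cons.mp hnd).1
    rw [List.foldl_cons, List.foldl_cons]
    by_cases h : reorder_items_kle labels a = []
    · rw [collectStep_nil h, bestStep_nil h]
      exact ih hnd' d (fun a' ha' => hc a' (List.mem_cons_of_mem _ ha'))
    · rw [collectStep_cons h, bestStep_cons h]
      have hins : (d.insert a (reorder_items_kle labels a)).items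
          = d.items ++ [(a, reorder_items_kle labels a)] := by
        simp [PySem.Dict.insert, hca]
      have hc' : ∀ a' ∈ rest,
          (d.insert a (reorder_items_kle labels a)).contains a' = false := by
        intro a' ha'
        have hne : a ≠ a' := fun he => hna (he ▸ ha')
        have h0 := hc a' (List.mem_cons_of_mem _ ha')
        simp only [PySem.Dict.contains] at h0 ⊢
        simp [hins, hne, h0]
      rw [ih hnd' _ hc']
      congr 1
      cases hm : PySem.List.min? d.items (fun x => x.2.length) with
      | none =>
        have hm' := hm
        simp only [PySem.List.min?] at hm'
        simp only [hins, PySem.List.min?, List.foldl_append]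
        rw [hm']
        rfl
      | some p =>
        have hm' := hm
        simp only [PySem.List.min?] at hm'
        simp only [hins, PySem.List.min?, List.foldl_append]
        rw [hm']
        rfl

-- ret entry j after the sources below i have been scattered
def pvPartial (labels : List (Option String)) (frow : List Int) (i : Nat) (j : Nat) : Option String :=
  let s := frow.getD j (-1)
  if s ≠ -1 ∧ s < (i : Int) ∧ pvTruthy (labels.getD s.toNat none) then
    labels.getD s.toNat none
  else none

theorem pvPartial_len (labels : List (Option String)) (frow : List Int) (j : Nat) :
    pvPartial labels frow labels.length j = pvGather labels frow j := rfl

-- a truthy label whose reverse-map slot is -1 makes the scatter loop return []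
theorem loop_break (a : Int) :
    ∀ (ys : List (Option String)) (i : Nat) (ret : List (Option String)),
    (∃ k : Nat, k < ys.length ∧ pvTruthy (ys.getD k none) ∧
      (pvRevMap.getD a.toNat []).getD (i + k) (-1) = -1) →
    pvReorderLoop a ys i ret = [] := by
  intro ys
  induction ys with
  | nil => intro i ret ⟨k, hk, _⟩; simp at hk
  | cons y ys ih =>
    intro i ret ⟨k, hk, ht, hm⟩
    cases k with
    | zero =>
      simp only [List.getD_cons_zero] at ht
      simp only [Nat.add_zero] at hm
      simp only [pvReorderLoop, ht, hm, eq_self_iff_true, if_true]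
    | succ k =>
      simp only [List.getD_cons_succ] at ht
      have hrec : ∀ r, pvReorderLoop a ys (i + 1) r = [] := fun r =>
        ih (i + 1) r ⟨k, by simpa using hk, ht, by rw [show i + 1 + k = i + (k + 1) by omega]; exact hm⟩
      by_cases hy : pvTruthy y
      · simp only [pvReorderLoop, hy, eq_self_iff_true, if_true]
        by_cases hi : (pvRevMap.getD a.toNat []).getD i (-1) = -1
        · rw [if_pos hi]
        · rw [if_neg hi]; exact hrec _
      · simp only [pvReorderLoop, hy, Bool.false_eq_true, if_neg, ite_false]
        exact hrec _

-- pvPartial is unchanged by one more step when position j is not fed from index i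
theorem pvPartial_succ_ne (labels : List (Option String)) (frow : List Int) (i j : Nat)
    (h : frow.getD j (-1) ≠ (i : Int)) :
    pvPartial labels frow (i + 1) j = pvPartial labels frow i j := by
  have h2 : (frow.getD j (-1) < ((i + 1 : Nat) : Int)) = (frow.getD j (-1) < ((i : Nat) : Int)) := by
    apply propext; push_cast; omega
  simp only [pvPartial, h2]

theorem pvPartial_succ_falsy (labels : List (Option String)) (frow : List Int) (i j : Nat)
    (h : pvTruthy (labels.getD i none) = false) :
    pvPartial labels frow (i + 1) j = pvPartial labels frow i j := by
  by_cases hs : frow.getD j (-1) = (i : Int)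
  · simp only [pvPartial, hs, Int.toNat_natCast, h]
    simp
  · exact pvPartial_succ_ne labels frow i j hs

-- scatter/gather invariant: if no break will occur, the loop result is the full gather
theorem loop_inv (a : Int) (labels : List (Option String)) (frow : List Int)
    (hrow : pvRowOk (pvRevMap.getD a.toNat []) frow)
    (hval : ∀ k : Nat, k < labels.length → pvTruthy (labels.getD k none) →
      (pvRevMap.getD a.toNat []).getD k (-1) ≠ -1) :
    ∀ (n i : Nat) (ret : List (Option String)), labels.length - i = n → i ≤ labels.length →
    ret.length = 12 →
    (∀ j : Nat, j < 12 → ret.getD j none = pvPartial labels frow i j) →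
    pvReorderLoop a (labels.drop i) i ret
      = (List.range 12).map (pvPartial labels frow labels.length) := by
  intro n
  induction n with
  | zero =>
    intro i ret hn hile hlen hinv
    have hieq : i = labels.length := by omega
    subst hieq
    rw [List.drop_length]
    simp only [pvReorderLoop]
    apply List.ext_getElem
    · simp [hlen]
    · intro j hj hj2
      have hj12 : j < 12 := by rw [hlen] at hj; exact hj
      have h1 := hinv j hj12
      rw [List.getD_eq_getElem _ _ hj] at h1
      simpa using h1
  | succ n ih =>
    intro i ret hn hile hlen hinv
    have hi : i < labels.length := by omega
    rw [List.drop_eq_getElem_cons hi]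
    by_cases ht : pvTruthy labels[i] = true
    · have htD : pvTruthy (labels.getD i none) = true := by
        rw [List.getD_eq_getElem _ _ hi]; exact ht
      have hrowi : (pvRevMap.getD a.toNat []).getD i (-1) ≠ -1 := hval i hi htD
      have hi12 : i < 12 := by
        by_contra hcon
        exact hrowi (List.getD_eq_default _ _ (by rw [hrow.1]; omega))
      obtain ⟨j0, hj0, hrij⟩ := (hrow.2.2.2.2.2 i hi12).resolve_left hrowi
      have hfj0 : frow.getD j0 (-1) = (i : Int) := (hrow.2.2.1 i hi12 j0 hj0).mp hrij
      simp only [pvReorderLoop, ht, if_true]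
      rw [if_neg hrowi, hrij, Int.toNat_natCast]
      apply ih (i + 1) _ (by omega) (by omega)
      · rw [List.length_set]; exact hlen
      · intro j hj
        by_cases hje : j = j0
        · rw [hje]
          have hjlen : j0 < (ret.set j0 labels[i]).length := by
            rw [List.length_set, hlen]; exact hj0
          rw [List.getD_eq_getElem _ _ hjlen, List.getElem_set_self]
          simp only [pvPartial, hfj0, Int.toNat_natCast]
          rw [if_pos ⟨by omega, by push_cast; omega, htD⟩]
          rw [List.getD_eq_getElem _ _ hi]
        · have hjlen : j < (ret.set j0 labels[i]).length := by
            rw [List.length_set, hlen]; exact hj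
          have hjlen' : j < ret.length := by rw [hlen]; exact hj
          rw [List.getD_eq_getElem _ _ hjlen, List.getElem_set_ne (Ne.symm hje)]
          rw [← List.getD_eq_getElem ret _ hjlen', hinv j hj]
          have hfne : frow.getD j (-1) ≠ (i : Int) := by
            intro hcon
            have := (hrow.2.2.1 i hi12 j hj).mpr hcon
            rw [hrij] at this
            exact hje (by exact_mod_cast this.symm)
          exact (pvPartial_succ_ne labels frow i j hfne).symm
    · have htD : pvTruthy (labels.getD i none) = false := by
        rw [List.getD_eq_getElem _ _ hi]; exact Bool.eq_false_iff.mpr ht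
      simp only [pvReorderLoop, ht, Bool.false_eq_true, if_false]
      apply ih (i + 1) ret (by omega) (by omega) hlen
      intro j hj
      rw [hinv j hj]
      exact (pvPartial_succ_falsy labels frow i j htD).symm

theorem pop_append_single (ys : List (Option String)) (y : Option String) :
    pvPopTrailing (ys ++ [y]) = if y = none then pvPopTrailing ys else ys ++ [y] := by
  induction ys with
  | nil =>
    by_cases hy : y = none <;> simp [pvPopTrailing, hy]
  | cons x xs ih =>
    by_cases hy : y = none
    · subst hy
      rw [if_pos rfl] at ih
      rw [if_pos rfl]
      simp only [List.cons_append, pvPopTrailing, ih]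
    · rw [if_neg hy] at ih
      rw [if_neg hy]
      simp only [List.cons_append, pvPopTrailing, ih]
      cases hxs : xs ++ [y] with
      | nil => exact absurd hxs (by simp)
      | cons z zs => rfl

theorem pop_map_range (g : Nat → Option String) :
    ∀ n, pvPopTrailing ((List.range n).map g)
      = (List.range ((List.range n).foldl (fun acc j => if g j ≠ none then j + 1 else acc) 0)).map g := by
  intro n
  induction n with
  | zero => rfl
  | succ n ih =>
    rw [List.range_succ, List.map_append, List.foldl_append, List.map_cons, List.map_nil,
      pop_append_single]
    by_cases hg : g n = none
    · simp only [hg, List.foldl_cons, List.foldl_nil, ne_eq, not_true_eq_false,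
        ite_false, if_true, ih]
    · simp only [hg, if_neg, ite_false, List.foldl_cons, List.foldl_nil, ne_eq,
        not_false_eq_true, ite_true]
      rw [List.range_succ, List.map_append, List.map_cons, List.map_nil]

-- the ok-flag loop computes validity
theorem flag_foldl (frow : List Int) :
    ∀ (xs : List (Int × Option String)) (acc : Bool),
    xs.foldl (fun ok p => if pvTruthy p.2 ∧ ¬(p.1 ∈ frow) then false else ok) acc
      = (acc && xs.all (fun p => !(pvTruthy p.2 && !(decide (p.1 ∈ frow))))) := by
  intro xs
  induction xs with
  | nil => intro acc; simp
  | cons x xs ih =>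
    intro acc
    rw [List.foldl_cons, List.all_cons, ih]
    by_cases hx : pvTruthy x.2 ∧ ¬(x.1 ∈ frow)
    · simp [hx.1, hx.2]
    · rcases Decidable.not_and_iff_not_or_not.mp hx with h | h
      · simp [hx, Bool.eq_false_iff.mpr h]
      · simp [hx, Decidable.not_not.mp h]

theorem okLoop_iff (labels : List (Option String)) (frow : List Int) :
    pvOkLoop labels frow = true ↔
      ∀ k : Nat, k < labels.length → pvTruthy (labels.getD k none) = true → (k : Int) ∈ frow := by
  unfold pvOkLoop
  rw [flag_foldl, Bool.true_and, List.all_eq_true]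
  constructor
  · intro h k hk ht
    have hm := h ((k : Int), labels[k])
      ((PySem.List.mem_enumerate_iff _ _ _).mpr ⟨k, hk, by simp⟩)
    rw [List.getD_eq_getElem _ _ hk] at ht
    simp only [ht, Bool.true_and, Bool.not_not, decide_eq_true_eq] at hm
    exact hm
  · intro h p hp
    obtain ⟨k, hk, rfl⟩ := (PySem.List.mem_enumerate_iff _ _ _).mp hp
    by_cases ht : pvTruthy labels[k] = true
    · have := h k hk (by rw [List.getD_eq_getElem _ _ hk]; exact ht)
      simp [ht, this]
    · simp [Bool.eq_false_iff.mpr ht]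

-- reorder via the reverse map = gather via the forward map
theorem reorder_char (labels : List (Option String)) (a : Int) (h0 : 0 ≤ a) (h8 : a < 8) :
    reorder_items_kle labels a =
      if pvOkLoop labels (pvFwdMap.getD a.toNat []) then
        pvMat labels a (pvLenLoop labels (pvFwdMap.getD a.toNat []))
      else [] := by
  have ha8 : a.toNat < 8 := by omega
  have hrow := pvRowOk_all a.toNat ha8
  cases hok : pvOkLoop labels (pvFwdMap.getD a.toNat []) with
  | true =>
    rw [if_pos rfl]
    have hval : ∀ k : Nat, k < labels.length → pvTruthy (labels.getD k none) →
        (pvRevMap.getD a.toNat []).getD k (-1) ≠ -1 := by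
      intro k hk ht
      have hmem : (k : Int) ∈ pvFwdMap.getD a.toNat [] :=
        (okLoop_iff labels _).mp hok k hk ht
      have hk12 : k < 12 := by
        rcases hrow.2.2.2.2.1 _ hmem with h | ⟨i, hi, he⟩
        · omega
        · have : k = i := by exact_mod_cast he
          omega
      exact (hrow.2.2.2.1 k hk12).mp hmem
    have hinv0 : ∀ j : Nat, j < 12 →
        (List.replicate 12 (none : Option String)).getD j none
          = pvPartial labels (pvFwdMap.getD a.toNat []) 0 j := by
      intro j hj
      have hjl : j < (List.replicate 12 (none : Option String)).length := by
        simp [hj]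
      rw [List.getD_eq_getElem _ _ hjl, List.getElem_replicate]
      have hmem : (pvFwdMap.getD a.toNat []).getD j (-1) ∈ pvFwdMap.getD a.toNat [] := by
        have hjf : j < (pvFwdMap.getD a.toNat []).length := by rw [hrow.2.1]; exact hj
        rw [List.getD_eq_getElem _ _ hjf]
        exact List.getElem_mem _
      rcases hrow.2.2.2.2.1 _ hmem with h | ⟨i, _, he⟩
      · simp only [pvPartial, h]
        rw [if_neg (by simp)]
      · simp only [pvPartial, he]
        rw [if_neg (by push_cast; omega)]
    unfold reorder_items_kle
    have hli := loop_inv a labels (pvFwdMap.getD a.toNat []) hrow hval labels.length 0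
      (List.replicate 12 none) (by omega) (by omega) (by simp) hinv0
    rw [List.drop_zero] at hli
    rw [hli]
    have hg : pvPartial labels (pvFwdMap.getD a.toNat []) labels.length
        = pvGather labels (pvFwdMap.getD a.toNat []) :=
      funext (pvPartial_len labels (pvFwdMap.getD a.toNat []))
    rw [hg, pop_map_range]
    rfl
  | false =>
    rw [if_neg (by simp)]
    have : ¬ ∀ k : Nat, k < labels.length → pvTruthy (labels.getD k none) = true →
        (k : Int) ∈ pvFwdMap.getD a.toNat [] := by
      intro hcon
      rw [(okLoop_iff labels _).mpr hcon] at hok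
      cases hok
    push_neg at this
    obtain ⟨k, hk, ht, hnm⟩ := this
    have hbad : (pvRevMap.getD a.toNat []).getD k (-1) = -1 := by
      by_cases hk12 : k < 12
      · by_contra hcon
        exact hnm ((hrow.2.2.2.1 k hk12).mpr hcon)
      · exact List.getD_eq_default _ _ (by rw [hrow.1]; omega)
    unfold reorder_items_kle
    rw [loop_break a labels 0 (List.replicate 12 none) ⟨k, hk, ht, by simpa using hbad⟩]
    rfl

-- the two drivers stay related by materialization
theorem steps_rel (labels : List (Option String)) :
    ∀ (as : List Int), (∀ x ∈ as, 0 ≤ x ∧ x < 8) → ∀ (sB : Option (Int × Nat)),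
    as.foldl (pvBestStep labels) (sB.map (fun p => (p.1, pvMat labels p.1 p.2)))
      = (as.foldl (pvAlignStep labels) sB).map (fun p => (p.1, pvMat labels p.1 p.2)) := by
  intro as
  induction as with
  | nil => intro _ sB; rfl
  | cons a rest ih =>
    intro h sB
    have ha := h a (List.mem_cons_self ..)
    have ih' := ih (fun x hx => h x (List.mem_cons_of_mem _ hx))
    rw [List.foldl_cons, List.foldl_cons]
    have hchar := reorder_char labels a ha.1 ha.2
    cases hok : pvOkLoop labels (pvFwdMap.getD a.toNat []) with
    | false =>
      rw [hok] at hchar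
      simp only [Bool.false_eq_true, if_false] at hchar
      rw [bestStep_nil hchar]
      have hB : pvAlignStep labels sB a = sB := by
        simp only [pvAlignStep]
        rw [hok]
        simp
      rw [hB]
      exact ih' sB
    | true =>
      rw [hok, if_pos rfl] at hchar
      by_cases hL : pvLenLoop labels (pvFwdMap.getD a.toNat []) = 0
      · have hnil : reorder_items_kle labels a = [] := by rw [hchar, hL]; rfl
        rw [bestStep_nil hnil]
        have hB : pvAlignStep labels sB a = sB := by
          simp only [pvAlignStep]
          rw [hok, hL]
          simp
        rw [hB]
        exact ih' sB
      · have hlen : (reorder_items_kle labels a).length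
            = pvLenLoop labels (pvFwdMap.getD a.toNat []) := by
          rw [hchar]; simp [pvMat]
        have hne : ¬ reorder_items_kle labels a = [] := by
          intro hcon
          rw [hcon] at hlen
          exact hL hlen.symm
        have hLtrue : (pvLenLoop labels (pvFwdMap.getD a.toNat []) != 0) = true := by
          simpa using hL
        cases sB with
        | none =>
          have hA : pvBestStep labels ((none : Option (Int × Nat)).map
                (fun p => (p.1, pvMat labels p.1 p.2))) a
              = (some ((a, pvLenLoop labels (pvFwdMap.getD a.toNat [])) : Int × Nat)).map
                (fun p => (p.1, pvMat labels p.1 p.2)) := by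
            rw [Option.map_none, bestStep_cons hne, Option.map_some, hchar]
          have hB : pvAlignStep labels none a
              = some (a, pvLenLoop labels (pvFwdMap.getD a.toNat [])) := by
            simp only [pvAlignStep]
            rw [hok, hLtrue]
            simp
          rw [hA, hB]
          exact ih' (some (a, pvLenLoop labels (pvFwdMap.getD a.toNat [])))
        | some b =>
          have hblen : (pvMat labels b.1 b.2).length = b.2 := by simp [pvMat]
          by_cases hlt : (reorder_items_kle labels a).length < b.2
          · have hA : pvBestStep labels ((some b).map
                  (fun p => (p.1, pvMat labels p.1 p.2))) a
                = (some ((a, pvLenLoop labels (pvFwdMap.getD a.toNat [])) : Int × Nat)).map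
                  (fun p => (p.1, pvMat labels p.1 p.2)) := by
              rw [Option.map_some, bestStep_cons hne]
              simp only [hblen]
              rw [if_pos hlt, Option.map_some, hchar]
            have hB : pvAlignStep labels (some b) a
                = some (a, pvLenLoop labels (pvFwdMap.getD a.toNat [])) := by
              have hbetter : decide (pvLenLoop labels (pvFwdMap.getD a.toNat []) < b.2)
                  = true := by
                rw [decide_eq_true_eq, ← hlen]; exact hlt
              simp only [pvAlignStep]
              rw [hok, hLtrue]
              simp only [hbetter, Bool.true_and, Bool.and_true, Bool.and_false]
              rfl
            rw [hA, hB]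
            exact ih' (some (a, pvLenLoop labels (pvFwdMap.getD a.toNat [])))
          · have hA : pvBestStep labels ((some b).map
                  (fun p => (p.1, pvMat labels p.1 p.2))) a
                = (some b).map (fun p => (p.1, pvMat labels p.1 p.2)) := by
              rw [Option.map_some, bestStep_cons hne]
              simp only [hblen]
              rw [if_neg hlt]
            have hB : pvAlignStep labels (some b) a = some b := by
              have hbetter : decide (pvLenLoop labels (pvFwdMap.getD a.toNat []) < b.2)
                  = false := by
                rw [decide_eq_false_iff_not, ← hlen]; exact hlt
              simp only [pvAlignStep]
              rw [hok, hLtrue]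
              simp only [hbetter, Bool.true_and, Bool.and_true, Bool.and_false]
              rfl
            rw [hA, hB]
            exact ih' (some b)

-- ===== VERDICT (by name: the statement is the Claim_ definition above) =====
theorem find_best_label_alignment_spec : Claim_equal_find_best_label_alignment := by
  intro labels _ _
  unfold Spec_find_best_label_alignment find_best_label_alignment find_best_label_alignment_alt
  rw [pyRange_0_8_rev, pyRange_7_down]
  have h := pv_fuse labels [7, 6, 5, 4, 3, 2, 1, 0] (by decide) PySem.Dict.empty
      (fun a _ => rfl)
  have he : PySem.List.min? (PySem.Dict.empty :
      PySem.Dict Int (List (Option String))).items (fun x => x.2.length) = none := rfl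
  rw [he] at h
  have hs := steps_rel labels [7, 6, 5, 4, 3, 2, 1, 0] (by decide) none
  simp only [Option.map_none] at hs
  show (match PySem.List.min?
      (List.foldl (pvCollectStep labels) PySem.Dict.empty [7, 6, 5, 4, 3, 2, 1, 0]).items
      (fun x => x.2.length) with
    | some best => (best.1, best.2)
    | none => ((0 : Int), ([] : List (Option String)))) =
    (match List.foldl (pvAlignStep labels) none [7, 6, 5, 4, 3, 2, 1, 0] with
    | none => ((0 : Int), ([] : List (Option String)))
    | some (a, L) => (a, (List.range L).map (fun j => pvGather labels (pvFwdMap.getD a.toNat []) j)))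
  rw [h, hs]
  cases List.foldl (pvAlignStep labels) none [7, 6, 5, 4, 3, 2, 1, 0] with
  | none => rfl
  | some p => rfl
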